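-- pv_equiv track=rewrite | github.com/progzone122/penumbra | scripts/find_crypto_offsets.py | cluster_constants
-- ===== SOURCE A (Python) =====
-- from typing import Dict, List, Optional, Union
--
-- def cluster_constants(offsets, max_gap=0x10, min_k=3) -> List[Dict[int, int]]:
--     offset_sorted = sorted((offset, val) for val, lst in offsets.items() for offset in lst)
--
--     clusters = []
--     current = []
--     unique_vals = set()
--     last_offset = None
--
--     for offset, val in offset_sorted:
--         if last_offset is None or offset - last_offset <= max_gap:
--             current.append((val, offset))
--             unique_vals.add(val)
--         else:
--             if len(unique_vals) >= min_k:
--                 cluster_dict = {val: off for val, off in current}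
--                 clusters.append(cluster_dict)
--
--             current = [(val, offset)]
--             unique_vals = {val}
--
--         last_offset = offset
--
--     if current and len(unique_vals) >= min_k:
--         cluster_dict = {val: off for val, off in current}
--         clusters.append(cluster_dict)
--
--     return clusters
-- ===== SOURCE B (Python) =====
-- def cluster_constants(offsets, max_gap=0x10, min_k=3):
--     # Boundary-index decomposition: find the gap positions with one pairwise
--     # zip, then slice the sorted list at those cut points and keep each slice
--     # that carries enough distinct values.
--     pairs = sorted((off, val) for val, lst in offsets.items() for off in lst)
--     if not pairs:
--         return []
--     cuts = [0] + [i for i, (a, b) in enumerate(zip(pairs, pairs[1:]), 1)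
--                   if b[0] - a[0] > max_gap] + [len(pairs)]
--     result = []
--     for lo, hi in zip(cuts, cuts[1:]):
--         run = pairs[lo:hi]
--         if len({v for _, v in run}) >= min_k:
--             result.append({v: off for off, v in run})
--     return result
-- ===== Notes on version B (the rewrite author's own statement) =====
-- stated objective: alternative
-- what changed: A grows clusters statefully in one interleaved pass (current list, unique-value set, last_offset, end-of-loop flush); B has no per-element cluster state: it computes the gap boundary indices with one pairwise zip, slices the sorted list at those cut points, and keeps each slice with enough distinct values.
import Mathlib
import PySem

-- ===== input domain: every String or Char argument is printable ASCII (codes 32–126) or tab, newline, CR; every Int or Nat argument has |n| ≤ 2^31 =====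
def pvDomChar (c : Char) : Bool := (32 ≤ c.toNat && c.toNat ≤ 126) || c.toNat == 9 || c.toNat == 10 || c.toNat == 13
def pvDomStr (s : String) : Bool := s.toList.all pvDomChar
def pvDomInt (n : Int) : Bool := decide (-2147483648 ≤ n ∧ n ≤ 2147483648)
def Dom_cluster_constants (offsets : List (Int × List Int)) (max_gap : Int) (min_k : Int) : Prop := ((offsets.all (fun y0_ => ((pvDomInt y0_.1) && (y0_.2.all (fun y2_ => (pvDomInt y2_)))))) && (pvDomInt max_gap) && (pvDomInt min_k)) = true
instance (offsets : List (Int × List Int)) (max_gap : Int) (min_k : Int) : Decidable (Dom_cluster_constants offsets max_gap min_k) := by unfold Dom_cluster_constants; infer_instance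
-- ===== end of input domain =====

-- B replaces A's stateful single pass (current cluster, unique-value set, last_offset,
-- end-of-loop flush) by boundary indices: one pairwise zip finds the gap positions,
-- the sorted list is sliced at those cuts, and each slice with enough distinct values
-- is kept (objective: alternative decomposition, same asymptotic cost).

-- ===== PORT A =====

-- {val: off for val, off in current}  (current holds (val, offset) pairs)
def pvDictOf (cur : List (Int × Int)) : List (Int × Int) :=
  (cur.foldl (fun d p => PySem.Dict.insert d p.1 p.2) PySem.Dict.empty).items

-- A's for-loop over offset_sorted, state (clusters, current, unique_vals, last_offset),
-- followed by the final flush 'if current and len(unique_vals) >= min_k'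
def pvLoopA (mg mk : Int) (clusters : List (List (Int × Int))) (cur : List (Int × Int))
    (uniq : PySem.Set Int) (last : Option Int) : List (Int × Int) → List (List (Int × Int))
  | [] => if cur ≠ [] ∧ mk ≤ (uniq.length : Int) then clusters ++ [pvDictOf cur] else clusters
  | (off, v) :: rest =>
    match last with
    | none => pvLoopA mg mk clusters (cur ++ [(v, off)]) (PySem.Set.add uniq v) (some off) rest
    | some l =>
      if off - l ≤ mg then
        pvLoopA mg mk clusters (cur ++ [(v, off)]) (PySem.Set.add uniq v) (some off) rest
      else
        pvLoopA mg mk (if mk ≤ (uniq.length : Int) then clusters ++ [pvDictOf cur] else clusters)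
          [(v, off)] (PySem.Set.ofList [v]) (some off) rest

def cluster_constants (offsets : List (Int × List Int)) (max_gap : Int) (min_k : Int) : List (List (Int × Int)) :=
  let pairs := PySem.List.sorted2
    (offsets.flatMap (fun vl => vl.2.map (fun off => (off, vl.1)))) Prod.fst Prod.snd
  pvLoopA max_gap min_k [] [] PySem.Set.empty none pairs

-- ===== PORT B =====

-- [i for i, (a, b) in enumerate(zip(pairs, pairs[1:]), 1) if b[0] - a[0] > max_gap]
def pvBreaks (mg : Int) (pairs : List (Int × Int)) : List Int :=
  (PySem.List.enumerate (pairs.zip (pairs.drop 1)) 1).filterMap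
    (fun iab => if iab.2.2.1 - iab.2.1.1 > mg then some iab.1 else none)

-- cuts = [0] + breaks + [len(pairs)]
def pvCuts (mg : Int) (pairs : List (Int × Int)) : List Int :=
  0 :: pvBreaks mg pairs ++ [(pairs.length : Int)]

def cluster_constants_alt (offsets : List (Int × List Int)) (max_gap : Int) (min_k : Int) : List (List (Int × Int)) :=
  let pairs := PySem.List.sorted2
    (offsets.flatMap (fun vl => vl.2.map (fun off => (off, vl.1)))) Prod.fst Prod.snd
  if pairs = [] then [] else
  let cuts := pvCuts max_gap pairs
  -- for lo, hi in zip(cuts, cuts[1:]): run = pairs[lo:hi]; if …: result.append(…)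
  (cuts.zip (cuts.drop 1)).foldl (fun acc lh =>
    let run := PySem.List.slice pairs (some lh.1) (some lh.2)
    if min_k ≤ ((PySem.Set.ofList (run.map Prod.snd)).length : Int)
    then acc ++ [(run.foldl (fun d p => PySem.Dict.insert d p.2 p.1) PySem.Dict.empty).items]
    else acc) []

-- ===== PRECONDITION & SPEC =====
def Spec_cluster_constants (offsets : List (Int × List Int)) (max_gap : Int) (min_k : Int) (out : List (List (Int × Int))) : Prop := out = cluster_constants_alt offsets max_gap min_k
instance (offsets : List (Int × List Int)) (max_gap : Int) (min_k : Int) (out : List (List (Int × Int))) : Decidable (Spec_cluster_constants offsets max_gap min_k out) := by unfold Spec_cluster_constants; infer_instance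

-- ===== CLAIM (what is proved, stated in full; the proofs are below) =====
def Claim_equal_cluster_constants : Prop := ∀ (offsets : List (Int × List Int)) (max_gap : Int) (min_k : Int), Dom_cluster_constants offsets max_gap min_k → Spec_cluster_constants offsets max_gap min_k (cluster_constants offsets max_gap min_k)

-- ===== LEMMAS AND PROOFS =====

-- proof-side run splitter: pvRuns mg pairs is the list of gap-bounded runs of pairs
def pvStepB (mg : Int) (acc : List (List (Int × Int))) (p : Int × Int) : List (List (Int × Int)) :=
  match acc with
  | [] => [[p]]
  | r :: rs =>
    match r with
    | [] => [p] :: rs  -- unreachable: runs are never empty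
    | q :: _ => if q.1 - p.1 ≤ mg then (p :: r) :: rs else [p] :: r :: rs

def pvRuns (mg : Int) (pairs : List (Int × Int)) : List (List (Int × Int)) :=
  pairs.reverse.foldl (pvStepB mg) []

-- emit a run: keep it iff it has ≥ min_k distinct values, as a val ↦ offset dict
def pvEmit (mk : Int) (r : List (Int × Int)) : List (List (Int × Int)) :=
  if mk ≤ ((PySem.Set.ofList (r.map Prod.snd)).length : Int)
  then [(r.foldl (fun d p => PySem.Dict.insert d p.2 p.1) PySem.Dict.empty).items] else []

-- glue a nonempty run-prefix curP (last offset l) onto an already-built run list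
def pvGlue (mg : Int) (curP : List (Int × Int)) (l : Int)
    (rs : List (List (Int × Int))) : List (List (Int × Int)) :=
  match rs with
  | [] => [curP]
  | r :: rs' =>
    match r with
    | [] => curP :: rs'
    | q :: _ => if q.1 - l ≤ mg then (curP ++ r) :: rs' else curP :: r :: rs'

theorem pvStepB_eq_glue (mg : Int) (acc : List (List (Int × Int))) (p : Int × Int) :
    pvStepB mg acc p = pvGlue mg [p] p.1 acc := by
  cases acc with
  | nil => rfl
  | cons r rs => cases r with
    | nil => rfl
    | cons q t => simp [pvStepB, pvGlue]

theorem pvRuns_cons (mg : Int) (p : Int × Int) (rest : List (Int × Int)) :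
    pvRuns mg (p :: rest) = pvStepB mg (pvRuns mg rest) p := by
  simp [pvRuns, List.foldl_append]

-- glue after a continuing step (gap ≤ mg): the new pair joins the current run
theorem pvGlue_cont (mg : Int) (curP : List (Int × Int)) (l : Int) (p : Int × Int)
    (rs : List (List (Int × Int))) (h : p.1 - l ≤ mg) :
    pvGlue mg curP l (pvStepB mg rs p) = pvGlue mg (curP ++ [p]) p.1 rs := by
  cases rs with
  | nil => simp [pvStepB, pvGlue, h]
  | cons r rs' =>
    cases r with
    | nil => simp [pvStepB, pvGlue, h]
    | cons q t =>
      by_cases hq : q.1 - p.1 ≤ mg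
      · simp [pvStepB, pvGlue, h, hq]
      · simp [pvStepB, pvGlue, h, hq]

-- glue after a breaking step (gap > mg): curP is closed off
theorem pvGlue_break (mg : Int) (curP : List (Int × Int)) (l : Int) (p : Int × Int)
    (rs : List (List (Int × Int))) (h : ¬ p.1 - l ≤ mg) :
    pvGlue mg curP l (pvStepB mg rs p) = curP :: pvStepB mg rs p := by
  cases rs with
  | nil => simp [pvStepB, pvGlue, h]
  | cons r rs' =>
    cases r with
    | nil => simp [pvStepB, pvGlue, h]
    | cons q t =>
      by_cases hq : q.1 - p.1 ≤ mg
      · simp [pvStepB, pvGlue, h, hq]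
      · simp [pvStepB, pvGlue, h, hq]

theorem pvStepB_eq_glue' (mg off v : Int) (acc : List (List (Int × Int))) :
    pvGlue mg [(off, v)] off acc = pvStepB mg acc (off, v) :=
  (pvStepB_eq_glue mg acc (off, v)).symm

-- A's emitted dict = the run's emitted dict (curP is cur with components swapped)
theorem pvEmit_swap (mk : Int) (cur : List (Int × Int)) (hne : cur ≠ []) :
    (if cur ≠ [] ∧ mk ≤ ((PySem.Set.ofList (cur.map Prod.fst)).length : Int)
     then [pvDictOf cur] else []) =
    pvEmit mk (cur.map (fun p => (p.2, p.1))) := by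
  have hm : (cur.map (fun p => ((p.2 : Int), (p.1 : Int)))).map Prod.snd
      = cur.map Prod.fst := by simp
  have hd : ((cur.map (fun p => ((p.2 : Int), (p.1 : Int)))).foldl
      (fun d p => PySem.Dict.insert d p.2 p.1) PySem.Dict.empty).items = pvDictOf cur := by
    simp [pvDictOf, List.foldl_map]
  simp only [pvEmit, hm, hd, hne, ne_eq, not_false_iff, true_and]

-- main A-side invariant: A's loop from a nonempty current run = clusters ++ emitted runs
theorem pvLoopA_eq (mg mk : Int) (rest : List (Int × Int)) :
    ∀ (clusters : List (List (Int × Int))) (cur : List (Int × Int)) (l : Int), cur ≠ [] →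
    pvLoopA mg mk clusters cur (PySem.Set.ofList (cur.map Prod.fst)) (some l) rest
      = clusters ++ (pvGlue mg (cur.map (fun p => (p.2, p.1))) l (pvRuns mg rest)).flatMap (pvEmit mk) := by
  induction rest with
  | nil =>
    intro clusters cur l hne
    have hruns : pvRuns mg ([] : List (Int × Int)) = [] := rfl
    rw [hruns]
    simp only [pvLoopA, pvGlue, List.flatMap_cons, List.flatMap_nil, List.append_nil]
    rw [← pvEmit_swap mk cur hne]
    by_cases h : mk ≤ ((PySem.Set.ofList (cur.map Prod.fst)).length : Int)
    · simp [hne, h]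
    · simp [hne, h]
  | cons p rest ih =>
    intro clusters cur l hne
    obtain ⟨off, v⟩ := p
    rw [pvRuns_cons]
    by_cases h : off - l ≤ mg
    · -- continue the current run
      have hadd : PySem.Set.add (PySem.Set.ofList (cur.map Prod.fst)) v
          = PySem.Set.ofList ((cur ++ [(v, off)]).map Prod.fst) := by
        simp [PySem.Set.ofList_eq_foldl, List.foldl_append]
      have hih := ih clusters (cur ++ [(v, off)]) off (by simp)
      simp only [pvLoopA, h, if_pos]
      rw [hadd, hih, pvGlue_cont mg _ l (off, v) _ h]
      simp
    · -- gap: close the current run and start a new one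
      have hnew : PySem.Set.ofList [v] = PySem.Set.ofList ([((v : Int), (off : Int))].map Prod.fst) := by simp
      have hih := ih (if mk ≤ ((PySem.Set.ofList (cur.map Prod.fst)).length : Int)
          then clusters ++ [pvDictOf cur] else clusters) [(v, off)] off (by simp)
      simp only [pvLoopA, h, if_neg, not_false_iff]
      rw [hnew, hih, pvGlue_break mg _ l (off, v) _ h]
      simp only [List.map_cons, List.map_nil] at *
      rw [pvStepB_eq_glue']
      rw [List.flatMap_cons, ← pvEmit_swap mk cur hne]
      by_cases hk : mk ≤ ((PySem.Set.ofList (cur.map Prod.fst)).length : Int)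
      · simp [hne, hk]
      · simp [hne, hk]

theorem pvLoopA_top (mg mk : Int) (pairs : List (Int × Int)) :
    pvLoopA mg mk [] [] PySem.Set.empty none pairs
      = (pvRuns mg pairs).flatMap (pvEmit mk) := by
  cases pairs with
  | nil => simp [pvLoopA, pvRuns]
  | cons p rest =>
    obtain ⟨off, v⟩ := p
    have h1 : PySem.Set.add PySem.Set.empty v
        = PySem.Set.ofList ([((v : Int), (off : Int))].map Prod.fst) := by
      simp [PySem.Set.ofList_eq_foldl, PySem.Set.empty]
    simp only [pvLoopA, List.nil_append]
    rw [h1, pvLoopA_eq mg mk rest [] [(v, off)] off (by simp), pvRuns_cons]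
    simp only [List.map_cons, List.map_nil]
    rw [pvStepB_eq_glue']
    simp

-- ===== B-side lemmas =====

-- B's run list: slices of pairs at the cut points
def pvRunsB (mg : Int) (pairs : List (Int × Int)) : List (List (Int × Int)) :=
  ((pvCuts mg pairs).zip ((pvCuts mg pairs).drop 1)).map
    (fun lh => PySem.List.slice pairs (some lh.1) (some lh.2))

-- shifting the enumeration start shifts every kept index
theorem pvBreaks_shift (mg : Int) (l : List ((Int × Int) × (Int × Int))) :
    ∀ s : Int, (PySem.List.enumerate l (s + 1)).filterMap
      (fun iab => if iab.2.2.1 - iab.2.1.1 > mg then some iab.1 else none)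
    = ((PySem.List.enumerate l s).filterMap
      (fun iab => if iab.2.2.1 - iab.2.1.1 > mg then some iab.1 else none)).map (· + 1) := by
  induction l with
  | nil => intro s; simp [PySem.List.enumerate_nil]
  | cons x xs ih =>
    intro s
    rw [PySem.List.enumerate_cons, PySem.List.enumerate_cons]
    by_cases h : x.2.1 - x.1.1 > mg
    · simp only [List.filterMap_cons, h, if_pos]
      rw [show s + 1 + 1 = (s + 1) + 1 from rfl, ih (s + 1)]
      simp
    · simp only [List.filterMap_cons, h, if_neg, not_false_iff]
      rw [show s + 1 + 1 = (s + 1) + 1 from rfl, ih (s + 1)]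

theorem pvBreaks_ge (mg : Int) (l : List ((Int × Int) × (Int × Int))) :
    ∀ (s x : Int), x ∈ (PySem.List.enumerate l s).filterMap
      (fun iab => if iab.2.2.1 - iab.2.1.1 > mg then some iab.1 else none) → s ≤ x := by
  induction l with
  | nil => intro s x h; simp [PySem.List.enumerate_nil] at h
  | cons y ys ih =>
    intro s x h
    rw [PySem.List.enumerate_cons] at h
    rcases List.mem_filterMap.mp h with ⟨p, hp, hpx⟩
    rcases List.mem_cons.mp hp with rfl | hp'
    · split at hpx
      · have : s = x := by simpa using hpx
        omega
      · simp at hpx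
    · have := ih (s + 1) x (List.mem_filterMap.mpr ⟨p, hp', hpx⟩)
      omega

theorem pvBreaks_one_le (mg : Int) (pairs : List (Int × Int)) :
    ∀ x ∈ pvBreaks mg pairs, 1 ≤ x := fun x hx => pvBreaks_ge mg _ 1 x hx

theorem pvCuts_nonneg (mg : Int) (pairs : List (Int × Int)) :
    ∀ x ∈ pvCuts mg pairs, 0 ≤ x := by
  intro x hx
  have hx0 : x ∈ (0 : Int) :: (pvBreaks mg pairs ++ [((pairs.length : Nat) : Int)]) := hx
  rcases List.mem_cons.mp hx0 with rfl | hx'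
  · omega
  · rcases List.mem_append.mp hx' with h | h
    · have := pvBreaks_one_le mg pairs x h; omega
    · have hxl : x = ((pairs.length : Nat) : Int) := by simpa using h
      rw [hxl]; exact Int.natCast_nonneg _

-- the breaks of p :: rest: a possible break at index 1, then rest's breaks shifted
theorem pvBreaks_cons (mg : Int) (p q : Int × Int) (rest : List (Int × Int)) :
    pvBreaks mg (p :: q :: rest)
      = (if q.1 - p.1 > mg then [(1 : Int)] else []) ++ (pvBreaks mg (q :: rest)).map (· + 1) := by
  show (PySem.List.enumerate (((p :: q :: rest).zip ((p :: q :: rest).drop 1))) 1).filterMap _ = _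
  have hz : (p :: q :: rest).zip ((p :: q :: rest).drop 1)
      = (p, q) :: ((q :: rest).zip ((q :: rest).drop 1)) := by
    cases rest <;> rfl
  rw [hz, PySem.List.enumerate_cons, List.filterMap_cons]
  have hs := pvBreaks_shift mg ((q :: rest).zip ((q :: rest).drop 1)) 1
  by_cases h : q.1 - p.1 > mg
  · simp only [h, if_pos, hs]; rfl
  · simp only [h, if_neg, not_false_iff, hs]; rfl

-- slicing a cons at shifted bounds is slicing the tail
theorem pvSlice_shift (p : Int × Int) (xs : List (Int × Int)) (a b : Int)
    (ha : 0 ≤ a) (hb : 0 ≤ b) :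
    PySem.List.slice (p :: xs) (some (a + 1)) (some (b + 1))
      = PySem.List.slice xs (some a) (some b) := by
  rw [PySem.List.slice_toNat _ (by omega) (by omega), PySem.List.slice_toNat _ ha hb]
  have h1 : (a + 1).toNat = a.toNat + 1 := by omega
  have h2 : (b + 1).toNat = b.toNat + 1 := by omega
  rw [h1, h2]
  simp [List.drop_succ_cons]

theorem pvSlice_cons_zero (p : Int × Int) (xs : List (Int × Int)) (h : Int) (hh : 0 ≤ h) :
    PySem.List.slice (p :: xs) (some 0) (some (h + 1))
      = p :: PySem.List.slice xs (some 0) (some h) := by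
  rw [PySem.List.slice_toNat _ (by omega) (by omega), PySem.List.slice_toNat _ (by omega) hh]
  have h2 : (h + 1).toNat = h.toNat + 1 := by omega
  simp [h2, List.take_succ_cons]

-- pvStepB always puts the new pair at the head of the head run
theorem pvStepB_head (mg : Int) (acc : List (List (Int × Int))) (p : Int × Int) :
    ∃ t rs, pvStepB mg acc p = (p :: t) :: rs := by
  cases acc with
  | nil => exact ⟨[], [], rfl⟩
  | cons r rs =>
    cases r with
    | nil => exact ⟨[], rs, rfl⟩
    | cons q t =>
      by_cases h : q.1 - p.1 ≤ mg
      · exact ⟨q :: t, rs, by simp [pvStepB, h]⟩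
      · exact ⟨[], (q :: t) :: rs, by simp [pvStepB, h]⟩

theorem pvRuns_head (mg : Int) (q : Int × Int) (rest : List (Int × Int)) :
    ∃ t rs, pvRuns mg (q :: rest) = (q :: t) :: rs := by
  rw [pvRuns_cons]; exact pvStepB_head mg (pvRuns mg rest) q

-- prepending p and shifting all cuts by one: the first slice absorbs index 0,
-- the remaining shifted slices are the original slices of the tail
theorem pvShiftedSlices (p : Int × Int) (pairs : List (Int × Int)) (h0 : Int) (T : List Int)
    (hh : 0 ≤ h0) (hT : ∀ x ∈ T, 0 ≤ x) :
    ((0 :: (h0 :: T).map (· + 1)).zip ((0 :: (h0 :: T).map (· + 1)).drop 1)).map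
        (fun lh => PySem.List.slice (p :: pairs) (some lh.1) (some lh.2))
      = PySem.List.slice (p :: pairs) (some 0) (some (h0 + 1))
        :: ((h0 :: T).zip T).map (fun lh => PySem.List.slice pairs (some lh.1) (some lh.2)) := by
  simp only [List.map_cons, List.drop_succ_cons, List.drop_zero, List.zip_cons_cons]
  congr 1
  rw [show ((h0 + 1) :: T.map (· + 1)) = (h0 :: T).map (· + 1) from by simp]
  rw [List.zip_map, List.map_map]
  apply List.map_congr_left
  intro lh hlh
  have h2 : lh.2 ∈ T := (List.of_mem_zip hlh).2
  have hn1 : 0 ≤ lh.1 := by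
    rcases List.mem_cons.mp (List.of_mem_zip hlh).1 with h1 | h1
    · rw [h1]; exact hh
    · exact hT lh.1 h1
  simp only [Function.comp_apply]
  exact pvSlice_shift p pairs lh.1 lh.2 hn1 (hT lh.2 h2)

-- main B-side lemma: the cut-and-slice runs are exactly the gap-bounded runs
theorem pvRunsB_eq (mg : Int) : ∀ (pairs : List (Int × Int)), pairs ≠ [] →
    pvRunsB mg pairs = pvRuns mg pairs := by
  intro pairs
  induction pairs with
  | nil => intro h; exact absurd rfl h
  | cons p rest ih =>
    intro _
    cases rest with
    | nil =>
      have hb : pvBreaks mg [p] = [] := rfl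
      have hc : pvCuts mg [p] = [0, 1] := by simp [pvCuts, hb]
      have h1 : PySem.List.slice [p] (some (0 : Int)) (some (1 : Int)) = [p] := by
        rw [PySem.List.slice_toNat _ (by omega) (by omega)]; rfl
      show ((pvCuts mg [p]).zip ((pvCuts mg [p]).drop 1)).map
        (fun lh => PySem.List.slice [p] (some lh.1) (some lh.2)) = pvRuns mg [p]
      rw [hc]
      show [PySem.List.slice [p] (some (0 : Int)) (some (1 : Int))] = pvRuns mg [p]
      rw [h1]; rfl
    | cons q rest' =>
      have ihne := ih (by simp)
      obtain ⟨t, rs, hR⟩ := pvRuns_head mg q rest'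
      have hnn := pvCuts_nonneg mg (q :: rest')
      have hlen : (((p :: q :: rest').length : Nat) : Int) = (((q :: rest').length : Nat) : Int) + 1 := by
        push_cast [List.length_cons]; ring
      rw [pvRuns_cons, hR]
      by_cases hgap : q.1 - p.1 > mg
      · -- break right after p
        have hstep : pvStepB mg ((q :: t) :: rs) p = [p] :: (q :: t) :: rs := by
          simp [pvStepB, show ¬ q.1 - p.1 ≤ mg from by omega]
        rw [hstep, ← hR, ← ihne]
        obtain ⟨cs, hc⟩ : ∃ cs, pvCuts mg (q :: rest') = 0 :: cs := ⟨_, rfl⟩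
        have hcuts : pvCuts mg (p :: q :: rest') = 0 :: ((0 :: cs).map (· + 1)) := by
          rw [← hc]
          simp only [pvCuts, pvBreaks_cons mg p q rest', hgap, if_pos, hlen]
          simp [List.map_append]
        have hcs : ∀ x ∈ cs, 0 ≤ x := fun x hx => hnn x (by rw [hc]; exact List.mem_cons_of_mem _ hx)
        show ((pvCuts mg (p :: q :: rest')).zip ((pvCuts mg (p :: q :: rest')).drop 1)).map
          (fun lh => PySem.List.slice (p :: q :: rest') (some lh.1) (some lh.2))
            = [p] :: pvRunsB mg (q :: rest')
        rw [hcuts, pvShiftedSlices p (q :: rest') 0 cs (le_refl 0) hcs]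
        have h01 : PySem.List.slice (p :: q :: rest') (some 0) (some ((0 : Int) + 1)) = [p] := by
          rw [PySem.List.slice_toNat _ (by omega) (by omega)]; rfl
        rw [h01]
        congr 1
        show _ = ((pvCuts mg (q :: rest')).zip ((pvCuts mg (q :: rest')).drop 1)).map
          (fun lh => PySem.List.slice (q :: rest') (some lh.1) (some lh.2))
        rw [hc]
        rfl
      · -- p joins rest's first run
        have hq : q.1 - p.1 ≤ mg := by omega
        have hstep : pvStepB mg ((q :: t) :: rs) p = (p :: q :: t) :: rs := by
          simp [pvStepB, hq]
        rw [hstep]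
        obtain ⟨h0, T', hT⟩ : ∃ h0 T',
            pvBreaks mg (q :: rest') ++ [(((q :: rest').length : Nat) : Int)] = h0 :: T' := by
          cases hx : pvBreaks mg (q :: rest') with
          | nil => exact ⟨(((q :: rest').length : Nat) : Int), [], by simp [hx]⟩
          | cons a b => exact ⟨a, b ++ [(((q :: rest').length : Nat) : Int)], by simp [hx]⟩
        have hcutsR : pvCuts mg (q :: rest') = 0 :: h0 :: T' := by
          show (0 : Int) :: (pvBreaks mg (q :: rest') ++ [(((q :: rest').length : Nat) : Int)]) = _
          rw [hT]
        have hn0 : 0 ≤ h0 := hnn h0 (by rw [hcutsR]; simp)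
        have hT'nn : ∀ x ∈ T', 0 ≤ x := fun x hx => hnn x (by rw [hcutsR]; simp [hx])
        have hcuts : pvCuts mg (p :: q :: rest') = 0 :: ((h0 :: T').map (· + 1)) := by
          rw [← hT]
          simp only [pvCuts, pvBreaks_cons mg p q rest', hgap, if_neg, not_false_iff, hlen]
          simp [List.map_append]
        have hrB : PySem.List.slice (q :: rest') (some 0) (some h0) = q :: t
            ∧ ((h0 :: T').zip T').map
                (fun lh => PySem.List.slice (q :: rest') (some lh.1) (some lh.2)) = rs := by
          have h1 : pvRunsB mg (q :: rest')
              = PySem.List.slice (q :: rest') (some 0) (some h0)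
                :: ((h0 :: T').zip T').map
                  (fun lh => PySem.List.slice (q :: rest') (some lh.1) (some lh.2)) := by
            simp only [pvRunsB, hcutsR, List.drop_succ_cons, List.drop_zero,
              List.zip_cons_cons, List.map_cons]
          have h2 := h1.symm.trans (ihne.trans hR)
          exact ⟨by injection h2, by injection h2⟩
        show ((pvCuts mg (p :: q :: rest')).zip ((pvCuts mg (p :: q :: rest')).drop 1)).map
          (fun lh => PySem.List.slice (p :: q :: rest') (some lh.1) (some lh.2))
            = (p :: q :: t) :: rs
        rw [hcuts, pvShiftedSlices p (q :: rest') h0 T' hn0 hT'nn,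
          pvSlice_cons_zero p (q :: rest') h0 hn0, hrB.1, hrB.2]

-- B's foldl loop = flatMap of pvEmit over the slice runs
theorem pvRunsB_foldl (mg mk : Int) (pairs : List (Int × Int)) :
    ((pvCuts mg pairs).zip ((pvCuts mg pairs).drop 1)).foldl (fun acc lh =>
      let run := PySem.List.slice pairs (some lh.1) (some lh.2)
      if mk ≤ ((PySem.Set.ofList (run.map Prod.snd)).length : Int)
      then acc ++ [(run.foldl (fun d p => PySem.Dict.insert d p.2 p.1) PySem.Dict.empty).items]
      else acc) []
    = (pvRunsB mg pairs).flatMap (pvEmit mk) := by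
  have hfun : (fun (acc : List (List (Int × Int))) (lh : Int × Int) =>
      let run := PySem.List.slice pairs (some lh.1) (some lh.2)
      if mk ≤ ((PySem.Set.ofList (run.map Prod.snd)).length : Int)
      then acc ++ [(run.foldl (fun d p => PySem.Dict.insert d p.2 p.1) PySem.Dict.empty).items]
      else acc)
    = (fun acc lh => acc ++ pvEmit mk (PySem.List.slice pairs (some lh.1) (some lh.2))) := by
    funext acc lh
    simp only [pvEmit]
    split <;> simp
  rw [hfun, PySem.List.foldl_append_eq_flatMap]
  simp [pvRunsB, List.flatMap_map]

-- ===== VERDICT (by name: the statement is the Claim_ definition above) =====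
theorem cluster_constants_spec : Claim_equal_cluster_constants := by
  intro offsets max_gap min_k _
  unfold Spec_cluster_constants cluster_constants cluster_constants_alt
  set pairs := PySem.List.sorted2
    (offsets.flatMap (fun vl => vl.2.map (fun off => (off, vl.1)))) Prod.fst Prod.snd with hp
  by_cases hne : pairs = []
  · simp only [hne, if_pos]
    rfl
  · simp only [hne, if_neg, not_false_iff]
    rw [pvLoopA_top, pvRunsB_foldl, pvRunsB_eq max_gap pairs hne]
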